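-- pv_equiv track=rewrite | github.com/clubpenguinadvanced/dash | dash/routes/manager/moderation.py | get_paginated_result
-- ===== SOURCE A (Python) =====
-- def get_paginated_result(results):
--     paginated_results = {}
--     current_count = 0
--     pagination_limit = current_count + 10
--     page = 1
--     for result in results:
--         if current_count == 0:
--             paginated_results[page] = []
--             paginated_results[page].append(result)
--         elif current_count == pagination_limit:
--             page += 1
--             pagination_limit = current_count + 10
--             paginated_results[page] = []
--             paginated_results[page].append(result)
--         else:
--             paginated_results[page].append(result)
--         current_count += 1
--     return paginated_results
-- ===== SOURCE B (Python) =====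
-- def get_paginated_result(results):
--     items = list(results)
--     page_count = (len(items) + 9) // 10
--     pages = {}
--     for p in range(page_count):
--         pages[p + 1] = items[p * 10:(p + 1) * 10]
--     return pages
-- ===== Notes on version B (the rewrite author's own statement) =====
-- stated objective: idiomatic
-- what changed: Replaces the element-wise counter/limit/page state machine with a precomputed page count and one whole-page slice per page.
import Mathlib
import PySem

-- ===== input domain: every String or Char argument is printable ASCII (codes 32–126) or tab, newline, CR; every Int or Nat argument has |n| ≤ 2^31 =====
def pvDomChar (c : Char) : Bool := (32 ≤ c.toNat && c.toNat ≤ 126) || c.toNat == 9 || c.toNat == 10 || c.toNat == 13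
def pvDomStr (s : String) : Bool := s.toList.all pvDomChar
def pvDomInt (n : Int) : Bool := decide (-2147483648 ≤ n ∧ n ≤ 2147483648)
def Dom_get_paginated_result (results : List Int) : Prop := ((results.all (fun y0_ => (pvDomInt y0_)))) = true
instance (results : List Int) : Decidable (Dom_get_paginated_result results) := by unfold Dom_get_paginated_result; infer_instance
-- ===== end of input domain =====

-- B replaces A's element-wise counter/limit/page state machine with a precomputed
-- page count and one whole-page slice per page (same behaviour, idiomatic chunking).


-- ===== PORT A =====
-- one loop iteration of A: state is (paginated_results, current_count, pagination_limit, page)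
def pvStepA (st : PySem.Dict Int (List Int) × Int × Int × Int) (result : Int) :
    PySem.Dict Int (List Int) × Int × Int × Int :=
  let (d, cc, pl, pg) := st
  if cc == 0 then
    -- paginated_results[page] = []; paginated_results[page].append(result)
    let d := d.insert pg []
    let d := d.modify pg [] (fun l => l ++ [result])
    (d, cc + 1, pl, pg)
  else if cc == pl then
    let pg := pg + 1
    let pl := cc + 10
    let d := d.insert pg []
    let d := d.modify pg [] (fun l => l ++ [result])
    (d, cc + 1, pl, pg)
  else
    -- paginated_results[page].append(result): the key is present here, so modify with default [] is exact
    (d.modify pg [] (fun l => l ++ [result]), cc + 1, pl, pg)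

def get_paginated_result (results : List Int) : List (Int × List Int) :=
  (results.foldl pvStepA (PySem.Dict.empty, 0, 0 + 10, 1)).1.items

-- ===== PORT B =====
def get_paginated_result_alt (results : List Int) : List (Int × List Int) :=
  let items := results
  let page_count := PySem.Int.floordiv ((items.length : Int) + 9) 10
  let pages := (PySem.List.pyRange 0 page_count 1).foldl
    (fun (d : PySem.Dict Int (List Int)) p =>
      d.insert (p + 1) (PySem.List.slice items (some (p * 10)) (some ((p + 1) * 10))))
    PySem.Dict.empty
  pages.items

-- ===== PRECONDITION & SPEC =====
def Spec_get_paginated_result (results : List Int) (out : List (Int × List Int)) : Prop := out = get_paginated_result_alt results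
instance (results : List Int) (out : List (Int × List Int)) : Decidable (Spec_get_paginated_result results out) := by unfold Spec_get_paginated_result; infer_instance

-- ===== CLAIM (what is proved, stated in full; the proofs are below) =====
def Claim_equal_get_paginated_result : Prop := ∀ (results : List Int), Dom_get_paginated_result results → Spec_get_paginated_result results (get_paginated_result results)

-- ===== LEMMAS AND PROOFS =====

-- the common value both ports compute: pages of 10, first page numbered pg
def pvChunks (xs : List Int) (pg : Int) : List (Int × List Int) :=
  if h : xs = [] then []
  else (pg, xs.take 10) :: pvChunks (xs.drop 10) (pg + 1)
termination_by xs.length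
decreasing_by have : xs.length ≠ 0 := fun hl => h (List.eq_nil_of_length_eq_zero hl); simp [List.length_drop]; omega


-- B's fold builds exactly one slice per page
theorem pvB_fold (g : Nat → List Int) (n : Nat) :
    ((List.range n).foldl (fun d (k : Nat) => d.insert ((k : Int) + 1) (g k)) PySem.Dict.empty).items
      = (List.range n).map (fun (k : Nat) => ((k : Int) + 1, g k)) := by
  induction n with
  | zero => rfl
  | succ n ih =>
    rw [List.range_succ, List.foldl_append, List.map_append]
    set d := (List.range n).foldl (fun d (k : Nat) => d.insert ((k : Int) + 1) (g k)) PySem.Dict.empty with hd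
    have hcon : d.contains ((n : Int) + 1) = false := by
      have hk : d.keys = d.items.map Prod.fst := PySem.Dict.keys_mk d.items
      rw [← Bool.not_eq_true, PySem.Dict.contains_iff_mem_keys, hk, ih, List.map_map]
      simp [Function.comp]
    simp only [List.foldl_cons, List.foldl_nil, List.map_cons, List.map_nil]
    rw [PySem.Dict.items_insert_of_not_contains d _ hcon, ih]

theorem chunks_map (xs : List Int) (pg : Int) :
    pvChunks xs pg = (List.range ((xs.length + 9) / 10)).map
      (fun (k : Nat) => (pg + (k : Int), (xs.drop (10 * k)).take 10)) := by
  fun_induction pvChunks xs pg with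
  | case1 pg => rfl
  | case2 xs pg h ih =>
    have hlen : 0 < xs.length := List.length_pos_of_ne_nil h
    have hn : (xs.length + 9) / 10 = ((xs.drop 10).length + 9) / 10 + 1 := by
      simp [List.length_drop]; omega
    rw [hn, List.range_succ_eq_map, List.map_cons, ih, List.map_map]
    refine congrArg₂ _ (by simp) ?_
    refine List.map_congr_left fun k hk => ?_
    have h2 : List.drop (10 * (k + 1)) xs = List.drop (10 * k) (List.drop 10 xs) := by
      rw [List.drop_drop]; congr 1; omega
    simp [Function.comp, Nat.succ_eq_add_one, h2]; ring

theorem pvB_eq_chunks (xs : List Int) : get_paginated_result_alt xs = pvChunks xs 1 := by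
  unfold get_paginated_result_alt
  dsimp only
  have hpc : PySem.Int.floordiv ((xs.length : Int) + 9) 10 = (((xs.length + 9) / 10 : Nat) : Int) := by
    have h9 : ((xs.length : Int) + 9) = ((xs.length + 9 : Nat) : Int) := by push_cast; ring
    rw [h9]
    exact_mod_cast PySem.Int.floordiv_natCast (xs.length + 9) 10
  rw [hpc, PySem.List.pyRange_zero_nat, List.foldl_map]
  rw [pvB_fold (fun k => PySem.List.slice xs (some ((k : Int) * 10)) (some (((k : Int) + 1) * 10)))]
  rw [chunks_map]
  refine List.map_congr_left fun (k : Nat) hk => ?_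
  have hs : PySem.List.slice xs (some ((k : Int) * 10)) (some (((k : Int) + 1) * 10))
      = (xs.drop (10 * k)).take 10 := by
    have e1 : ((k : Int) * 10) = ((10 * k : Nat) : Int) := by push_cast; ring
    have e2 : (((k : Int) + 1) * 10) = ((10 * k + 10 : Nat) : Int) := by push_cast; ring
    rw [e1, e2, PySem.List.slice_natCast]
    congr 1; omega
  rw [hs]
  simp [add_comm]

theorem pvDict_eq_of_items {l : List (Int × List Int)} {d : PySem.Dict Int (List Int)}
    (h : d.items = l) : d = ⟨l⟩ := by cases d; cases h; rfl

theorem pvKeys_snoc (init : List (Int × List Int)) (pg : Int) (cur : List Int) (q : Int)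
    (hq : q ∈ ((init ++ [(pg, cur)]).map Prod.fst)) : q ∈ init.map Prod.fst ∨ q = pg := by
  rw [List.map_append, List.mem_append] at hq
  rcases hq with hq | hq
  · exact Or.inl hq
  · simp at hq; exact Or.inr hq

theorem pvMap_id (init : List (Int × List Int)) (pg : Int) (v : List Int)
    (h : ∀ q ∈ init.map Prod.fst, q ≠ pg) :
    init.map (fun p => if (p.1 == pg) = true then (pg, v) else p) = init := by
  induction init with
  | nil => rfl
  | cons a l ih =>
    simp only [List.map_cons, List.mem_cons, List.mem_map] at h ⊢
    rw [if_neg (by simp [h a.1 (by simp)]), ih (fun q hq => h q (by simp at hq ⊢; tauto))]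

theorem pvLast_get? (init : List (Int × List Int)) (pg : Int) (cur : List Int)
    (h : ∀ q ∈ init.map Prod.fst, q ≠ pg) :
    (PySem.Dict.mk (init ++ [(pg, cur)])).get? pg = some cur := by
  induction init with
  | nil => simp [PySem.Dict.get?_mk_cons]
  | cons a l ih =>
    rw [List.cons_append, PySem.Dict.get?_mk_cons, if_neg (by simp [h a.1 (by simp)])]
    exact ih (fun q hq => h q (by simp at hq ⊢; tauto))

theorem pvLast_insert_items (init : List (Int × List Int)) (pg : Int) (cur v : List Int)
    (h : ∀ q ∈ init.map Prod.fst, q ≠ pg) :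
    ((PySem.Dict.mk (init ++ [(pg, cur)])).insert pg v).items = init ++ [(pg, v)] := by
  have hcon : (PySem.Dict.mk (init ++ [(pg, cur)])).contains pg = true := by
    rw [PySem.Dict.contains_mk]; simp
  rw [PySem.Dict.items_insert_of_contains _ _ hcon]
  simp only [List.map_append, pvMap_id init pg v h, List.map_cons, List.map_nil]
  simp

theorem pvFresh_insert_items (l : List (Int × List Int)) (k : Int) (v : List Int)
    (h : ∀ q ∈ l.map Prod.fst, q ≠ k) :
    ((PySem.Dict.mk l).insert k v).items = l ++ [(k, v)] := by
  refine PySem.Dict.items_insert_of_not_contains _ _ ?_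
  rw [← Bool.not_eq_true, PySem.Dict.contains_mk]
  simp only [List.any_eq_true, beq_iff_eq, not_exists, not_and]
  intro p hp
  exact h p.1 (List.mem_map.mpr ⟨p, hp, rfl⟩)

theorem pvA_inv (xs : List Int) : ∀ (init : List (Int × List Int)) (cur : List Int)
    (pg cc : Int) (r : Nat),
    (∀ q ∈ init.map Prod.fst, q < pg) → 0 < cc → r ≤ 9 →
    (xs.foldl pvStepA (PySem.Dict.mk (init ++ [(pg, cur)]), cc, cc + (r : Int), pg)).1.items
      = init ++ [(pg, cur ++ xs.take r)] ++ pvChunks (xs.drop r) (pg + 1) := by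
  induction xs with
  | nil => intro init cur pg cc r h hcc hr; simp [pvChunks]
  | cons x xs ih =>
    intro init cur pg cc r h hcc hr
    have hne : ∀ q ∈ init.map Prod.fst, q ≠ pg := fun q hq => ne_of_lt (h q hq)
    have hlt' : ∀ q ∈ ((init ++ [(pg, cur)]).map Prod.fst), q < pg + 1 := by
      intro q hq
      rcases pvKeys_snoc init pg cur q hq with hq | hq
      · have := h q hq; omega
      · omega
    have hne' : ∀ q ∈ ((init ++ [(pg, cur)]).map Prod.fst), q ≠ pg + 1 :=
      fun q hq => ne_of_lt (hlt' q hq)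
    rw [List.foldl_cons]
    rcases Nat.eq_zero_or_pos r with hr0 | hrpos
    · -- r = 0 : the elif branch opens page pg+1
      subst hr0
      have hstep : pvStepA (PySem.Dict.mk (init ++ [(pg, cur)]), cc, cc + ((0 : Nat) : Int), pg) x
          = (PySem.Dict.mk ((init ++ [(pg, cur)]) ++ [(pg + 1, [x])]), cc + 1, cc + 10, pg + 1) := by
        simp only [pvStepA, Nat.cast_zero, add_zero, beq_iff_eq]
        rw [if_neg (by omega), if_pos trivial]
        have hd1 : (PySem.Dict.mk (init ++ [(pg, cur)])).insert (pg + 1) []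
            = PySem.Dict.mk ((init ++ [(pg, cur)]) ++ [(pg + 1, [])]) :=
          pvDict_eq_of_items (pvFresh_insert_items _ _ _ hne')
        rw [PySem.Dict.modify, hd1, PySem.Dict.getD_eq_get?_getD, pvLast_get? _ _ _ hne']
        have h2 := pvLast_insert_items (init ++ [(pg, cur)]) (pg + 1) [] ((some []).getD [] ++ [x]) hne'
        rw [pvDict_eq_of_items h2]
        rfl
      rw [hstep]
      have h10 : cc + 10 = (cc + 1) + ((9 : Nat) : Int) := by push_cast; ring
      rw [h10, ih (init ++ [(pg, cur)]) [x] (pg + 1) (cc + 1) 9 hlt' (by omega) (by omega)]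
      rw [show pvChunks (List.drop 0 (x :: xs)) (pg + 1)
          = (pg + 1, x :: xs.take 9) :: pvChunks (xs.drop 9) (pg + 1 + 1) from by
        rw [List.drop_zero, pvChunks]; simp]
      simp
    · -- 0 < r : the plain append branch
      obtain ⟨r', rfl⟩ : ∃ r', r = r' + 1 := ⟨r - 1, by omega⟩
      have hstep : pvStepA (PySem.Dict.mk (init ++ [(pg, cur)]), cc, cc + ((r' + 1 : Nat) : Int), pg) x
          = (PySem.Dict.mk (init ++ [(pg, cur ++ [x])]), cc + 1, cc + ((r' + 1 : Nat) : Int), pg) := by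
        simp only [pvStepA, beq_iff_eq]
        rw [if_neg (by omega), if_neg (by push_cast; omega)]
        rw [PySem.Dict.modify, PySem.Dict.getD_eq_get?_getD, pvLast_get? _ _ _ hne]
        have h2 := pvLast_insert_items init pg cur ((some cur).getD [] ++ [x]) hne
        rw [pvDict_eq_of_items h2]
        rfl
      rw [hstep]
      have hpl : cc + ((r' + 1 : Nat) : Int) = (cc + 1) + ((r' : Nat) : Int) := by push_cast; ring
      rw [hpl, ih init (cur ++ [x]) pg (cc + 1) r' h (by omega) (by omega)]
      simp

theorem pvA_eq_chunks (xs : List Int) : get_paginated_result xs = pvChunks xs 1 := by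
  cases xs with
  | nil => simp [get_paginated_result, pvChunks]; rfl
  | cons x rest =>
    unfold get_paginated_result
    rw [List.foldl_cons]
    have hstep : pvStepA (PySem.Dict.empty, 0, 0 + 10, 1) x
        = (PySem.Dict.mk ([] ++ [(1, [x])]), 1, 1 + ((9 : Nat) : Int), 1) := by
      simp only [pvStepA, beq_iff_eq]
      rw [if_pos trivial]
      rfl
    rw [hstep, pvA_inv rest [] [x] 1 1 9 (by simp) (by omega) (by omega)]
    rw [show pvChunks (x :: rest) 1 = (1, x :: rest.take 9) :: pvChunks (rest.drop 9) 2 from by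
      rw [pvChunks]; simp]
    simp

-- ===== VERDICT (by name: the statement is the Claim_ definition above) =====
theorem get_paginated_result_spec : Claim_equal_get_paginated_result := by
  intro results _
  unfold Spec_get_paginated_result
  rw [pvA_eq_chunks, pvB_eq_chunks]
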